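-- pv_equiv track=rewrite | github.com/hhyanyanGitHub/nand2tetris_nth | nand2tetris/nand2tetris/asm/assembler.py | second_pass
-- ===== SOURCE A (Python) =====
-- from typing import Dict, List
--
-- DEST = {
--     None: "000",
--     "M": "001",
--     "D": "010",
--     "MD": "011",
--     "A": "100",
--     "AM": "101",
--     "AD": "110",
--     "AMD": "111",
-- }
--
-- JUMP = {
--     None: "000",
--     "JGT": "001",
--     "JEQ": "010",
--     "JGE": "011",
--     "JLT": "100",
--     "JNE": "101",
--     "JLE": "110",
--     "JMP": "111",
-- }
--
-- COMP = {
--     "0":   "0101010",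
--     "1":   "0111111",
--     "-1":  "0111010",
--     "D":   "0001100",
--     "A":   "0110000",
--     "!D":  "0001101",
--     "!A":  "0110001",
--     "-D":  "0001111",
--     "-A":  "0110011",
--     "D+1": "0011111",
--     "A+1": "0110111",
--     "D-1": "0001110",
--     "A-1": "0110010",
--     "D+A": "0000010",
--     "D-A": "0010011",
--     "A-D": "0000111",
--     "D&A": "0000000",
--     "D|A": "0010101",
--     "M":   "1110000",
--     "!M":  "1110001",
--     "-M":  "1110011",
--     "M+1": "1110111",
--     "M-1": "1110010",
--     "D+M": "1000010",
--     "D-M": "1010011",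
--     "M-D": "1000111",
--     "D&M": "1000000",
--     "D|M": "1010101",
-- }
--
-- def parse_c_instruction(instr: str):
--     dest, comp, jump = None, None, None
--     if '=' in instr:
--         dest, instr = instr.split('=')
--     if ';' in instr:
--         comp, jump = instr.split(';')
--     else:
--         comp = instr
--     return dest, comp, jump
--
-- def second_pass(lines: List[str], symbols: Dict[str, int]) -> List[str]:
--     result = []
--     next_var_addr = 16
--
--     for line in lines:
--         if line.startswith('('):
--             continue
--
--         # A-instruction
--         if line.startswith('@'):
--             symbol = line[1:]
--             if symbol.isdigit():
--                 addr = int(symbol)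
--             else:
--                 if symbol not in symbols:
--                     symbols[symbol] = next_var_addr
--                     next_var_addr += 1
--                 addr = symbols[symbol]
--             result.append(f"0{addr:015b}")
--             continue
--
--         # C-instruction
--         dest, comp, jump = parse_c_instruction(line)
--         try:
--             code = "111" + COMP[comp] + DEST[dest] + JUMP[jump]
--         except KeyError:
--             raise ValueError(f"Invalid C-instruction: {line}")
--         result.append(code)
--
--     return result
-- ===== SOURCE B (Python) =====
-- from typing import Dict, List
--
-- DEST = {
--     None: "000", "M": "001", "D": "010", "MD": "011",
--     "A": "100", "AM": "101", "AD": "110", "AMD": "111",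
-- }
--
-- JUMP = {
--     None: "000", "JGT": "001", "JEQ": "010", "JGE": "011",
--     "JLT": "100", "JNE": "101", "JLE": "110", "JMP": "111",
-- }
--
-- COMP = {
--     "0":   "0101010", "1":   "0111111", "-1":  "0111010", "D":   "0001100",
--     "A":   "0110000", "!D":  "0001101", "!A":  "0110001", "-D":  "0001111",
--     "-A":  "0110011", "D+1": "0011111", "A+1": "0110111", "D-1": "0001110",
--     "A-1": "0110010", "D+A": "0000010", "D-A": "0010011", "A-D": "0000111",
--     "D&A": "0000000", "D|A": "0010101", "M":   "1110000", "!M":  "1110001",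
--     "-M":  "1110011", "M+1": "1110111", "M-1": "1110010", "D+M": "1000010",
--     "D-M": "1010011", "M-D": "1000111", "D&M": "1000000", "D|M": "1010101",
-- }
--
--
-- def _fields(instr):
--     dest = jump = None
--     if '=' in instr:
--         dest, instr = instr.split('=')
--     comp = instr
--     if ';' in instr:
--         comp, jump = instr.split(';')
--     return dest, comp, jump
--
--
-- def _encode(line, table):
--     if line.startswith('@'):
--         s = line[1:]
--         addr = int(s) if s.isdigit() else table[s]
--         return "0" + format(addr, '015b')
--     dest, comp, jump = _fields(line)
--     try:
--         return "111" + COMP[comp] + DEST[dest] + JUMP[jump]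
--     except KeyError:
--         raise ValueError(f"Invalid C-instruction: {line}")
--
--
-- def second_pass(lines: List[str], symbols: Dict[str, int]) -> List[str]:
--     # Phase 1: allocate every new variable symbol in first-appearance order.
--     table = dict(symbols)
--     next_var_addr = 16
--     for line in lines:
--         if line.startswith('@'):
--             s = line[1:]
--             if not s.isdigit() and s not in table:
--                 table[s] = next_var_addr
--                 next_var_addr += 1
--     # Phase 2: pure translation of every non-label line under the final table.
--     return [_encode(line, table) for line in lines if not line.startswith('(')]
-- ===== Notes on version B (the rewrite author's own statement) =====
-- stated objective: alternative
-- what changed: A interleaves variable-address allocation and code emission in one mutating loop over an accumulator; B is a two-phase design: a first pass that only builds the complete symbol table (in the same first-appearance order), then a pure comprehension that maps each non-label line to its binary word, leaving the caller's dict unmutated.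
import Mathlib
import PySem

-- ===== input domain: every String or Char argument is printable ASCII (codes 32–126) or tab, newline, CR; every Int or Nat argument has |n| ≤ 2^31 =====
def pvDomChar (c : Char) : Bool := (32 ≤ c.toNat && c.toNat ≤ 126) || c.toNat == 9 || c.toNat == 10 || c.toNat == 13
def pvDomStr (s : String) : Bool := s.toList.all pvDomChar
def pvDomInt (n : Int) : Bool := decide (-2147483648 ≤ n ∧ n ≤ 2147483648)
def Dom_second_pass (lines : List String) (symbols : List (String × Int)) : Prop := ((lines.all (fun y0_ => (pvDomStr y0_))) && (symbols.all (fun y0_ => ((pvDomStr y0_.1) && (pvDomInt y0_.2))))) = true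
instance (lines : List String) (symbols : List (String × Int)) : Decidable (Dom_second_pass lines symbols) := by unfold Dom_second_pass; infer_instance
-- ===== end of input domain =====

-- B replaces A's single mutating loop by a two-phase design (allocate all variable
-- symbols first, then purely translate each line); equivalence is about the RETURN
-- value only — Python A mutates the caller's `symbols` dict, B leaves it unchanged.

-- ===== PORT A =====
-- the module-level DEST / JUMP / COMP dict lookups, as total match functions returning
-- none exactly where Python's dict lookup raises KeyError
def destCode : Option String → Option String
  | none => some "000"
  | some "M" => some "001"
  | some "D" => some "010"
  | some "MD" => some "011"
  | some "A" => some "100"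
  | some "AM" => some "101"
  | some "AD" => some "110"
  | some "AMD" => some "111"
  | some _ => none

def jumpCode : Option String → Option String
  | none => some "000"
  | some "JGT" => some "001"
  | some "JEQ" => some "010"
  | some "JGE" => some "011"
  | some "JLT" => some "100"
  | some "JNE" => some "101"
  | some "JLE" => some "110"
  | some "JMP" => some "111"
  | some _ => none

def compCode : String → Option String
  | "0" => some "0101010"
  | "1" => some "0111111"
  | "-1" => some "0111010"
  | "D" => some "0001100"
  | "A" => some "0110000"
  | "!D" => some "0001101"
  | "!A" => some "0110001"
  | "-D" => some "0001111"
  | "-A" => some "0110011"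
  | "D+1" => some "0011111"
  | "A+1" => some "0110111"
  | "D-1" => some "0001110"
  | "A-1" => some "0110010"
  | "D+A" => some "0000010"
  | "D-A" => some "0010011"
  | "A-D" => some "0000111"
  | "D&A" => some "0000000"
  | "D|A" => some "0010101"
  | "M" => some "1110000"
  | "!M" => some "1110001"
  | "-M" => some "1110011"
  | "M+1" => some "1110111"
  | "M-1" => some "1110010"
  | "D+M" => some "1000010"
  | "D-M" => some "1010011"
  | "M-D" => some "1000111"
  | "D&M" => some "1000000"
  | "D|M" => some "1010101"
  | _ => none

-- f"0{addr:015b}"  (format(addr, '015b') = format(addr, 'b') zero-padded to width 15,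
-- sign kept in front — exactly PySem.Str.zfill of PySem.Int.toBin)
def fmtA (addr : Int) : String := "0" ++ PySem.Str.zfill (PySem.Int.toBin addr) 15

-- parse_c_instruction; the `| _ =>` fallbacks are where Python's tuple unpacking raises
-- ValueError (more than one '=' / ';'): those inputs are excluded by Pre_second_pass
def parse_c_instruction (instr : String) : Option String × String × Option String :=
  let p : Option String × String :=
    if PySem.Str.isIn "=" instr then
      match PySem.Str.split? instr "=" with
      | some [a, b] => (some a, b)
      | _ => (none, instr)
    else (none, instr)
  let dest := p.1
  let instr := p.2
  if PySem.Str.isIn ";" instr then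
    match PySem.Str.split? instr ";" with
    | some [c, j] => (dest, c, some j)
    | _ => (dest, instr, none)
  else (dest, instr, none)

-- A's loop: state = (symbol table, next_var_addr, result accumulator); on an invalid
-- C-instruction Python raises ValueError (excluded by Pre_second_pass) — the port skips
def secondGo (lines : List String) (d : PySem.Dict String Int) (n : Int) (acc : List String) : List String :=
  match lines with
  | [] => acc
  | line :: rest =>
    if PySem.Str.startswith line "(" then secondGo rest d n acc
    else if PySem.Str.startswith line "@" then
      let symbol := PySem.Str.slice line (some 1) none
      if PySem.Str.strIsdigit symbol then
        let addr := (PySem.Int.ofStr? symbol).getD 0   -- int(symbol); isdigit guarantees success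
        secondGo rest d n (acc ++ [fmtA addr])
      else if d.contains symbol then
        secondGo rest d n (acc ++ [fmtA (d.getD symbol 0)])
      else
        let d' := d.insert symbol n
        secondGo rest d' (n + 1) (acc ++ [fmtA (d'.getD symbol 0)])
    else
      let pf := parse_c_instruction line
      -- "111" + COMP[comp] + DEST[dest] + JUMP[jump]; a KeyError (a none here) makes
      -- Python raise ValueError — excluded by Pre_second_pass, the port skips the line
      let code? := (compCode pf.2.1).bind (fun c => (destCode pf.1).bind (fun dd =>
        (jumpCode pf.2.2).map (fun j => "111" ++ c ++ dd ++ j)))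
      secondGo rest d n (match code? with | some code => acc ++ [code] | none => acc)

def second_pass (lines : List String) (symbols : List (String × Int)) : List String :=
  secondGo lines (PySem.Dict.ofList symbols) 16 []

-- ===== PORT B =====
-- Source B's _fields (same split semantics as A's parser; B defines its own copy)
def parse_fields (instr : String) : Option String × String × Option String :=
  let p : Option String × String :=
    if PySem.Str.isIn "=" instr then
      match PySem.Str.split? instr "=" with
      | some [a, b] => (some a, b)
      | _ => (none, instr)
    else (none, instr)
  let dest := p.1
  let instr := p.2
  if PySem.Str.isIn ";" instr then
    match PySem.Str.split? instr ";" with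
    | some [c, j] => (dest, c, some j)
    | _ => (dest, instr, none)
  else (dest, instr, none)

-- Phase 1: populate the symbol table with every new variable, first-appearance order
def phase1 (lines : List String) (d : PySem.Dict String Int) (n : Int) : PySem.Dict String Int :=
  match lines with
  | [] => d
  | line :: rest =>
    if PySem.Str.startswith line "@" then
      let s := PySem.Str.slice line (some 1) none
      if !PySem.Str.strIsdigit s && !d.contains s then phase1 rest (d.insert s n) (n + 1)
      else phase1 rest d n
    else phase1 rest d n

-- Phase 2 helper: Source B's _encode; on an invalid C-instruction Python raises ValueError
-- (excluded by Pre_second_pass) — the port emits the getD defaults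
def encode_line (table : PySem.Dict String Int) (line : String) : String :=
  if PySem.Str.startswith line "@" then
    let s := PySem.Str.slice line (some 1) none
    let addr := if PySem.Str.strIsdigit s then (PySem.Int.ofStr? s).getD 0 else table.getD s 0
    "0" ++ PySem.Str.zfill (PySem.Int.toBin addr) 15
  else
    match parse_fields line with
    | (dest, comp, jump) =>
      "111" ++ (compCode comp).getD "" ++ (destCode dest).getD "" ++ (jumpCode jump).getD ""

def second_pass_alt (lines : List String) (symbols : List (String × Int)) : List String :=
  let table := phase1 lines (PySem.Dict.ofList symbols) 16
  (lines.filter (fun l => !PySem.Str.startswith l "(")).map (encode_line table)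

-- ===== PRECONDITION & SPEC =====
-- a line Python A processes without raising: a label, an A-instruction, or a
-- C-instruction with at most one '=' / ';' whose fields are in the COMP/DEST/JUMP tables
def validLine (line : String) : Bool :=
  PySem.Str.startswith line "(" || PySem.Str.startswith line "@" ||
  (PySem.Str.count line "=" ≤ 1 && PySem.Str.count line ";" ≤ 1 &&
    (match parse_c_instruction line with
     | (dest, comp, jump) => (compCode comp).isSome && (destCode dest).isSome && (jumpCode jump).isSome))

-- Pre_ excludes exactly the lines on which Python A raises ValueError (malformed split
-- or a COMP/DEST/JUMP key miss); A returns on every input Pre_ admits.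
def Pre_second_pass (lines : List String) (symbols : List (String × Int)) : Prop :=
  lines.all validLine = true

instance (lines : List String) (symbols : List (String × Int)) : Decidable (Pre_second_pass lines symbols) := by unfold Pre_second_pass; infer_instance

def pvWitness_second_pass : List String × (List (String × Int)) :=
  (["@2", "(LOOP)", "@x", "D=M+1;JGT", "@x", "0;JMP", "@SCREEN"], [("SCREEN", 16384)])

def Spec_second_pass (lines : List String) (symbols : List (String × Int)) (out : List String) : Prop := out = second_pass_alt lines symbols
instance (lines : List String) (symbols : List (String × Int)) (out : List String) : Decidable (Spec_second_pass lines symbols out) := by unfold Spec_second_pass; infer_instance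

-- ===== CLAIM (what is proved, stated in full; the proofs are below) =====
def Claim_equal_second_pass : Prop := ∀ (lines : List String) (symbols : List (String × Int)), Dom_second_pass lines symbols → Pre_second_pass lines symbols → Spec_second_pass lines symbols (second_pass lines symbols)

-- ===== LEMMAS AND PROOFS =====

-- the two parsers are the same function
theorem parse_fields_eq (s : String) : parse_fields s = parse_c_instruction s := rfl

-- a line cannot start with both '(' and '@'
theorem not_startswith_at_of_paren (l : String)
    (h : PySem.Str.startswith l "(" = true) : PySem.Str.startswith l "@" = false := by
  by_contra hc
  rw [Bool.not_eq_false] at hc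
  simp only [PySem.Str.startswith_eq] at h hc
  rw [PySem.Chars.startswith_iff] at h hc
  rcases h with ⟨t1, h1⟩; rcases hc with ⟨t2, h2⟩
  rw [← h2] at h1
  simp at h1

-- phase1 never changes a binding that already exists (it only appends fresh keys)
theorem phase1_get?_of_isSome (lines : List String) (d : PySem.Dict String Int) (n : Int)
    (k : String) (h : (d.get? k).isSome) : (phase1 lines d n).get? k = d.get? k := by
  induction lines generalizing d n with
  | nil => rfl
  | cons line rest ih =>
    unfold phase1
    split
    · set s := PySem.Str.slice line (some 1) none with hs
      by_cases hdig : (!PySem.Str.strIsdigit s && !d.contains s) = true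
      · rw [if_pos hdig]
        have hne : k ≠ s := by
          intro he
          rw [Bool.and_eq_true, Bool.not_eq_true', Bool.not_eq_true'] at hdig
          rw [PySem.Dict.contains_eq_isSome_get?] at hdig
          rw [← he] at hdig
          rw [h] at hdig
          exact absurd hdig.2 (by simp)
        rw [ih (d.insert s n) (n + 1) (by rw [PySem.Dict.get?_insert_of_ne d n hne]; exact h)]
        exact PySem.Dict.get?_insert_of_ne d n hne
      · rw [if_neg hdig]; exact ih d n h
    · exact ih d n h

-- the loop of A, under the final table of B's first phase
theorem secondGo_eq (lines : List String) (d : PySem.Dict String Int) (n : Int)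
    (acc : List String) (h : lines.all validLine = true) :
    secondGo lines d n acc =
      acc ++ (lines.filter (fun l => !PySem.Str.startswith l "(")).map
        (encode_line (phase1 lines d n)) := by
  induction lines generalizing d n acc with
  | nil => simp only [secondGo, phase1, List.filter_nil, List.map_nil, List.append_nil]
  | cons line rest ih =>
    rw [List.all_cons, Bool.and_eq_true] at h
    obtain ⟨hline, hrest⟩ := h
    by_cases h1 : PySem.Str.startswith line "(" = true
    · have h2 := not_startswith_at_of_paren line h1
      have h1c : PySem.Chars.startswith line.toList ['('] = true := by simpa using h1
      have h2c : PySem.Chars.startswith line.toList ['@'] = false := by simpa using h2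
      rw [secondGo, if_pos h1]
      rw [phase1, if_neg (by simp [h2c])]
      rw [List.filter_cons_of_neg (by simp [h1c])]
      exact ih d n acc hrest
    · rw [Bool.not_eq_true] at h1
      have h1c : PySem.Chars.startswith line.toList ['('] = false := by simpa using h1
      rw [secondGo, if_neg (by simp [h1c])]
      rw [List.filter_cons_of_pos (by simp [h1c]), List.map_cons]
      by_cases h2 : PySem.Str.startswith line "@" = true
      · have h2c : PySem.Chars.startswith line.toList ['@'] = true := by simpa using h2
        set s := PySem.Str.slice line (some 1) none with hs
        by_cases h3 : PySem.Str.strIsdigit s = true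
        · -- digit A-instruction: the table is irrelevant and phase1 skips the line
          have h3c : PySem.Chars.strIsdigit (PySem.List.slice line.toList (some 1) none) = true := by
            simpa [hs] using h3
          rw [if_pos h2, if_pos h3]
          rw [phase1, if_pos h2, ← hs, if_neg (by simp [hs, h3c])]
          rw [ih d n _ hrest]
          simp [encode_line, h2c, h3c, hs, fmtA]
        · have h3c : PySem.Chars.strIsdigit (PySem.List.slice line.toList (some 1) none) = false := by
            simpa [hs] using (Bool.not_eq_true _).mp h3
          rw [if_pos h2, if_neg h3]
          by_cases h4 : d.contains s = true
          · -- known symbol: phase1 skips, and its result still maps s to d's value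
            rw [if_pos h4]
            rw [phase1, if_pos h2, ← hs, if_neg (by simp [h4])]
            have hsome : (d.get? s).isSome := by
              rw [← PySem.Dict.contains_eq_isSome_get?]; exact h4
            have hval : (phase1 rest d n).getD (PySem.Str.slice line (some 1) none) 0 = d.getD s 0 := by
              rw [← hs, PySem.Dict.getD_eq_get?_getD, phase1_get?_of_isSome rest d n s hsome,
                ← PySem.Dict.getD_eq_get?_getD]
            rw [ih d n _ hrest]
            simp [encode_line, h2c, h3c, hval, hs, fmtA]
          · -- fresh symbol: phase1 inserts it with the same address n
            rw [Bool.not_eq_true] at h4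
            rw [if_neg (by simp [h4])]
            rw [phase1, if_pos h2, ← hs, if_pos (by simp [hs, h3c, show d.contains (PySem.Str.slice line (some 1) none) = false from hs ▸ h4])]
            have hsome : ((d.insert s n).get? s).isSome := by
              rw [PySem.Dict.get?_insert_self]; rfl
            have hval : (phase1 rest (d.insert (PySem.Str.slice line (some 1) none) n) (n + 1)).getD
                (PySem.Str.slice line (some 1) none) 0 = n := by
              rw [← hs, PySem.Dict.getD_eq_get?_getD,
                phase1_get?_of_isSome rest (d.insert s n) (n + 1) s hsome,
                ← PySem.Dict.getD_eq_get?_getD, PySem.Dict.getD_insert_self]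
            rw [ih (d.insert s n) (n + 1) _ hrest]
            simp [encode_line, h2c, h3c, hval, hs, fmtA]
      · -- C-instruction: validLine gives all three codes, the table is irrelevant
        rw [Bool.not_eq_true] at h2
        have h2c : PySem.Chars.startswith line.toList ['@'] = false := by simpa using h2
        rw [if_neg (by simp [h2c])]
        unfold validLine at hline
        rw [h1, h2] at hline
        simp only [Bool.false_or, Bool.and_eq_true] at hline
        rcases hp : parse_c_instruction line with ⟨dest, comp, jump⟩
        rw [hp] at hline
        obtain ⟨⟨_, _⟩, hcodes⟩ := hline
        obtain ⟨⟨hc, hd⟩, hj⟩ := hcodes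
        rw [Option.isSome_iff_exists] at hc hd hj
        obtain ⟨c, hc⟩ := hc; obtain ⟨dd, hd⟩ := hd; obtain ⟨j, hj⟩ := hj
        rw [phase1, if_neg (by simp [h2c])]
        simp only [hc, hd, hj, Option.bind_some, Option.map_some]
        rw [ih d n _ hrest]
        simp [encode_line, h2c, parse_fields_eq, hp, hc, hd, hj]

-- ===== VERDICT (by name: the statement is the Claim_ definition above) =====
theorem second_pass_spec : Claim_equal_second_pass := by
  intro lines symbols _ hpre
  unfold Spec_second_pass second_pass second_pass_alt
  rw [secondGo_eq lines (PySem.Dict.ofList symbols) 16 [] hpre]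
  simp
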